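-- pv_equiv track=rewrite | github.com/AK16092003/mini-projects-py | Hangman/help_module.py | check_valid_word
-- ===== SOURCE A (Python) =====
-- def check_valid_word(word):
--
--     n = len(word)
--     alpha = 0
--     open_bracket = 0
--     closed_bracket = 0
--     space = 0
--     for i in range(n):
--         if word[i].isalpha():
--             alpha += 1
--         elif word[i] == " ":
--             space += 1
--         elif word[i] == "(":
--             open_bracket += 1
--         elif word[i] == ")":
--             closed_bracket += 1
--         else:
--             return False
--     else:
--         if open_bracket == closed_bracket and open_bracket in [0,1]:
--             if alpha>space>=0:
--                 if alpha >= 3: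
--                     # allowed
--                     return True
--     return False
-- ===== SOURCE B (Python) =====
-- def check_valid_word(word):
--     if not all(c.isalpha() or c in ' ()' for c in word):
--         return False
--     alpha = sum(c.isalpha() for c in word)
--     space = word.count(' ')
--     op = word.count('(')
--     cl = word.count(')')
--     return op == cl and op in (0, 1) and alpha > space and alpha >= 3
-- ===== Notes on version B (the rewrite author's own statement) =====
-- stated objective: idiomatic
-- what changed: Replaces the fused early-exit counting loop with a one-shot validity gate (all()) followed by independent count scans and a single flattened boolean condition.
import Mathlib
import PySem

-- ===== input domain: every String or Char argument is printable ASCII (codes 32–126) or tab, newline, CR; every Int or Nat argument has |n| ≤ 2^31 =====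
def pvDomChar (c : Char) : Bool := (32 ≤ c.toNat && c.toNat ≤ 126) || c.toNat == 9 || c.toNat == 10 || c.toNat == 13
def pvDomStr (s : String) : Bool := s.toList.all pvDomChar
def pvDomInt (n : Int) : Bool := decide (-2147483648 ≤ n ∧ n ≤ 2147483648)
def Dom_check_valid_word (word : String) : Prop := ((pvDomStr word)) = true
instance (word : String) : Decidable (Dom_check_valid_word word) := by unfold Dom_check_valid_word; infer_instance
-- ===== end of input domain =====

-- B replaces A's fused early-exit counting loop by a validity gate plus independent
-- count scans and one flattened boolean (idiomatic; same complexity).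

-- ===== PORT A =====
-- the final nested-if check A performs after the loop (its 'else:' block)
def cvwFinal (alpha ob cb sp : Int) : Bool :=
  if ob = cb ∧ (ob = 0 ∨ ob = 1) then
    if alpha > sp ∧ sp ≥ 0 then
      if alpha ≥ 3 then true else false
    else false
  else false

-- A's loop over the characters with its four counters; 'else: return False' = false
def cvwLoop : List Char → Int → Int → Int → Int → Bool
  | [], alpha, ob, cb, sp => cvwFinal alpha ob cb sp
  | c :: rest, alpha, ob, cb, sp =>
    if PySem.Chars.isalpha c then cvwLoop rest (alpha + 1) ob cb sp
    else if c = ' ' then cvwLoop rest alpha ob cb (sp + 1)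
    else if c = '(' then cvwLoop rest alpha (ob + 1) cb sp
    else if c = ')' then cvwLoop rest alpha ob (cb + 1) sp
    else false

def check_valid_word (word : String) : Bool :=
  cvwLoop word.toList 0 0 0 0

-- ===== PORT B =====
def check_valid_word_alt (word : String) : Bool :=
  let cs := word.toList
  if ¬ (cs.all (fun c => PySem.Chars.isalpha c || [' ', '(', ')'].contains c)) then false
  else
    let alpha : Int := cs.countP (fun c => PySem.Chars.isalpha c)
    let sp : Int := cs.count ' '
    let op : Int := cs.count '('
    let cl : Int := cs.count ')'
    op == cl && (op == 0 || op == 1) && alpha > sp && alpha ≥ 3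

-- ===== PRECONDITION & SPEC =====
def Spec_check_valid_word (word : String) (out : Bool) : Prop := out = check_valid_word_alt word
instance (word : String) (out : Bool) : Decidable (Spec_check_valid_word word out) := by unfold Spec_check_valid_word; infer_instance

-- ===== CLAIM (what is proved, stated in full; the proofs are below) =====
def Claim_equal_check_valid_word : Prop := ∀ (word : String), Dom_check_valid_word word → Spec_check_valid_word word (check_valid_word word)

-- ===== LEMMAS AND PROOFS =====
lemma cvwLoop_inv (cs : List Char) : ∀ a o c s : Int,
    cvwLoop cs a o c s =
      if cs.all (fun ch => PySem.Chars.isalpha ch || [' ', '(', ')'].contains ch) then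
        cvwFinal (a + (cs.countP (fun ch => PySem.Chars.isalpha ch) : Int))
                 (o + (cs.count '(' : Int)) (c + (cs.count ')' : Int)) (s + (cs.count ' ' : Int))
      else false := by
  induction cs with
  | nil => simp [cvwLoop]
  | cons ch rest ih =>
    intro a o c s
    by_cases hα : PySem.Chars.isalpha ch = true
    · have h1 : ch ≠ '(' := by rintro rfl; revert hα; decide
      have h2 : ch ≠ ')' := by rintro rfl; revert hα; decide
      have h3 : ch ≠ ' ' := by rintro rfl; revert hα; decide
      simp [cvwLoop, hα, ih, h1, h2, h3, add_comm,
        add_left_comm]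
    · by_cases hs : ch = ' '
      · subst hs
        simp [cvwLoop, hα, ih, add_comm, add_left_comm]
      · by_cases ho : ch = '('
        · subst ho
          simp [cvwLoop, hα, ih, add_comm,
            add_left_comm]
        · by_cases hc : ch = ')'
          · subst hc
            simp [cvwLoop, hα, ih, add_comm,
              add_left_comm]
          · simp [cvwLoop, hα, hs, ho, hc]

-- ===== VERDICT (by name: the statement is the Claim_ definition above) =====
theorem check_valid_word_spec : Claim_equal_check_valid_word := by
  intro word _
  unfold Spec_check_valid_word check_valid_word check_valid_word_alt
  rw [cvwLoop_inv]
  cases hall : word.toList.all (fun ch => PySem.Chars.isalpha ch || [' ', '(', ')'].contains ch) with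
  | false =>
    simp
    intro hv
    exfalso
    rw [List.all_eq_false] at hall
    obtain ⟨x, hx, hpx⟩ := hall
    have := hv x hx
    simp at hpx
    tauto
  | true =>
    simp only [hall, if_pos, zero_add]
    norm_num
    unfold cvwFinal
    split_ifs <;> simp_all <;> try omega
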